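-- pv_equiv track=rewrite | github.com/zhenghaohui/tyan | tyan_cxx_parser/tyan_cxx_parser.py | short_head_content
-- ===== SOURCE A (Python) =====
-- from typing import List
--
-- def check_condition_define(line: str) -> bool:
--     return (
--             line.startswith("#ifdef")
--             or line.startswith("#ifndef")
--             or line.startswith("#else")
--             or line.startswith("#elseif")
--             or line.startswith("#endif"))
--
-- def short_head_content(content: List[str]) -> List[str] :
--     updated_content = []
--     for idx, line in enumerate(content):
--         is_condition_define = check_condition_define(line)
--         if (len(updated_content) == 0
--                 or updated_content[-1].count("//")
--                 or updated_content[-1].count("/*")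
--                 or is_condition_define):
--             if is_condition_define:
--                 line = f"\n{line}\n"
--             updated_content.append(line)
--             continue
--         if line.startswith("."):
--             updated_content[-1] += line
--         else:
--             updated_content[-1] += " " + line
--     return updated_content
-- ===== SOURCE B (Python) =====
-- from typing import List
--
-- _COND_PREFIXES = ("#ifdef", "#ifndef", "#else", "#elseif", "#endif")
--
-- def _is_cond(line: str) -> bool:
--     return line.startswith(_COND_PREFIXES)
--
-- def _render(group: List[str]) -> str:
--     head = group[0]
--     s = f"\n{head}\n" if _is_cond(head) else head
--     for line in group[1:]:
--         s += line if line.startswith(".") else " " + line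
--     return s
--
-- def short_head_content(content: List[str]) -> List[str]:
--     # Phase 1: split the raw lines into contiguous groups, looking back only
--     # at the previous raw line (a line with a comment closes its group; a
--     # conditional directive always starts a fresh group).
--     groups: List[List[str]] = []
--     rest = content
--     while rest:
--         prev, rest = rest[0], rest[1:]
--         group = [prev]
--         while rest and not ("//" in prev or "/*" in prev or _is_cond(rest[0])):
--             prev, rest = rest[0], rest[1:]
--             group.append(prev)
--         groups.append(group)
--     # Phase 2: render each group into a single merged line.
--     return [_render(g) for g in groups]
-- ===== Notes on version B (the rewrite author's own statement) =====
-- stated objective: alternative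
-- what changed: A's single interleaved loop that re-scans the growing accumulated string for '//' and '/*' at every step is replaced by two phases: split the raw lines into groups using a lookback on the previous raw line only, then render each group; a proved junction lemma shows the separators never create a new comment marker, so checking the previous raw line is exact.
import Mathlib
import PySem

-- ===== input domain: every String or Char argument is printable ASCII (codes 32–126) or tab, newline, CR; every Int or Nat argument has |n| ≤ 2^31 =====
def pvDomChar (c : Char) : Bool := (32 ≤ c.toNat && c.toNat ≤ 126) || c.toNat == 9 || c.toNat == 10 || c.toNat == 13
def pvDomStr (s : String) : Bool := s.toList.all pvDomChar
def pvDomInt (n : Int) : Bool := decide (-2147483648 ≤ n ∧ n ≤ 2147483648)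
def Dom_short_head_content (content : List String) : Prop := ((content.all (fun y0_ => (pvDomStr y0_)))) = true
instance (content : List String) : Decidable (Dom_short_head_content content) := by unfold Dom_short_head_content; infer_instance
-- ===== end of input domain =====

-- B re-implements A's single interleaved merge loop as two phases (group the raw lines with a lookback on the previous raw line, then render each group); same return value, proved equal.

-- ===== PORT A =====
def check_condition_define (line : String) : Bool :=
  PySem.Str.startswith line "#ifdef"
  || PySem.Str.startswith line "#ifndef"
  || PySem.Str.startswith line "#else"
  || PySem.Str.startswith line "#elseif"
  || PySem.Str.startswith line "#endif"

-- loop body of A's `for idx, line in enumerate(content)` (named so the proofs can cite it)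
def stepA (updated : List String) (line : String) : List String :=
  let is_condition_define := check_condition_define line
  if updated.isEmpty
      || (PySem.Str.count updated.getLast! "//" != 0)
      || (PySem.Str.count updated.getLast! "/*" != 0)
      || is_condition_define then
    updated ++ [if is_condition_define then "\n" ++ line ++ "\n" else line]
  else if PySem.Str.startswith line "." then
    updated.dropLast ++ [updated.getLast! ++ line]
  else
    updated.dropLast ++ [updated.getLast! ++ " " ++ line]

def short_head_content (content : List String) : List String :=
  content.foldl stepA []

-- ===== PORT B =====
def is_cond_alt (line : String) : Bool :=
  PySem.Str.startswith line "#ifdef"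
  || PySem.Str.startswith line "#ifndef"
  || PySem.Str.startswith line "#else"
  || PySem.Str.startswith line "#elseif"
  || PySem.Str.startswith line "#endif"

-- inner `while` of phase 1: lines joining prev's group, and the remaining lines
def takeGroup (prev : String) (rest : List String) : List String × List String :=
  match rest with
  | [] => ([], [])
  | x :: rs =>
    if PySem.Str.isIn "//" prev || PySem.Str.isIn "/*" prev || is_cond_alt x then
      ([], x :: rs)
    else
      let p := takeGroup x rs
      (x :: p.1, p.2)

theorem takeGroup_snd_length (prev : String) (rest : List String) :
    (takeGroup prev rest).2.length ≤ rest.length := by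
  induction rest generalizing prev with
  | nil => simp [takeGroup]
  | cons x rs ih =>
    simp only [takeGroup]
    split
    · simp
    · exact le_trans (ih x) (by simp)

-- phase 1 outer `while`
def groupsOf : List String → List (List String)
  | [] => []
  | h :: rest => (h :: (takeGroup h rest).1) :: groupsOf (takeGroup h rest).2
  termination_by l => l.length
  decreasing_by exact Nat.lt_succ_of_le (takeGroup_snd_length h rest)

-- the `for line in group[1:]` loop of _render
def renderCont (s0 : String) (ls : List String) : String :=
  ls.foldl (fun s line =>
    if PySem.Str.startswith line "." then s ++ line else s ++ " " ++ line) s0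

def renderGroup (g : List String) : String :=
  match g with
  | [] => ""
  | head :: t => renderCont (if is_cond_alt head then "\n" ++ head ++ "\n" else head) t

def short_head_content_alt (content : List String) : List String :=
  (groupsOf content).map renderGroup

-- ===== PRECONDITION & SPEC =====
def Spec_short_head_content (content : List String) (out : List String) : Prop := out = short_head_content_alt content
instance (content : List String) (out : List String) : Decidable (Spec_short_head_content content out) := by unfold Spec_short_head_content; infer_instance

-- ===== CLAIM (what is proved, stated in full; the proofs are below) =====
def Claim_equal_short_head_content : Prop := ∀ (content : List String), Dom_short_head_content content → Spec_short_head_content content (short_head_content content)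

-- ===== LEMMAS AND PROOFS =====
theorem count_go_le (sub : List Char) (fuel : Nat) : ∀ (l : List Char) (acc : Nat),
    acc ≤ PySem.Chars.count.go sub fuel l acc := by
  induction fuel with
  | zero => intro l acc; simp [PySem.Chars.count.go]
  | succ n ih =>
    intro l acc
    cases l with
    | nil => simp [PySem.Chars.count.go]
    | cons h t =>
      rw [PySem.Chars.count.go]
      split
      · exact le_trans (Nat.le_succ acc) (ih _ _)
      · exact ih _ _

theorem count_go_pos_iff (sub : List Char) (hsub : sub ≠ []) (fuel : Nat) :
    ∀ (l : List Char), l.length ≤ fuel → ∀ (acc : Nat),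
    (acc < PySem.Chars.count.go sub fuel l acc ↔ sub <:+: l) := by
  induction fuel with
  | zero =>
    intro l hl acc
    have : l = [] := List.length_eq_zero_iff.mp (Nat.le_zero.mp hl)
    subst this
    simp [PySem.Chars.count.go, List.infix_nil, hsub]
  | succ n ih =>
    intro l hl acc
    cases l with
    | nil => simp [PySem.Chars.count.go, List.infix_nil, hsub]
    | cons h t =>
      rw [PySem.Chars.count.go]
      split
      · rename_i hp
        constructor
        · intro _
          exact ((List.isPrefixOf_iff_prefix).mp hp).isInfix
        · intro _
          calc acc < acc + 1 := Nat.lt_succ_self acc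
            _ ≤ _ := count_go_le sub n _ _
      · rename_i hp
        have hnp : ¬ sub <+: (h :: t) := fun hc => hp ((List.isPrefixOf_iff_prefix).mpr hc)
        rw [ih t (by simpa using Nat.le_of_succ_le_succ hl) acc, List.infix_cons_iff]
        tauto

theorem count_pos_iff (s sub : List Char) (hsub : sub ≠ []) :
    PySem.Chars.count s sub ≠ 0 ↔ sub <:+: s := by
  unfold PySem.Chars.count
  rw [if_neg (by simpa using hsub)]
  rw [← count_go_pos_iff sub hsub s.length s le_rfl 0]
  omega
theorem infix_pair_append (c1 c2 : Char) (x y : List Char) :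
    [c1, c2] <:+: x ++ y ↔
      [c1, c2] <:+: x ∨ [c1, c2] <:+: y ∨ (x.getLast? = some c1 ∧ y.head? = some c2) := by
  constructor
  · rintro ⟨s, t, h⟩
    rw [List.append_assoc] at h
    rcases List.append_eq_append_iff.mp h.symm with ⟨as, hs, hy⟩ | ⟨bs, hx, hbs⟩
    · exact Or.inr (Or.inl ⟨as, t, by rw [hy]; simp⟩)
    · cases bs with
      | nil => exact Or.inr (Or.inl ⟨[], t, by simpa using hbs⟩)
      | cons b1 bs' =>
        cases bs' with
        | nil =>
          obtain ⟨hb1, hy⟩ : c1 = b1 ∧ c2 :: t = y := by simpa using hbs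
          refine Or.inr (Or.inr ⟨?_, ?_⟩)
          · rw [hx, ← hb1]; simp
          · rw [← hy]; simp
        | cons b2 bs'' =>
          obtain ⟨hb1, hb2, _⟩ : c1 = b1 ∧ c2 = b2 ∧ t = bs'' ++ y := by simpa using hbs
          exact Or.inl ⟨s, bs'', by rw [hx, ← hb1, ← hb2]; simp⟩
  · rintro (h | h | ⟨h1, h2⟩)
    · exact h.trans (List.prefix_append x y).isInfix
    · exact h.trans (List.suffix_append x y).isInfix
    · obtain ⟨x', hx'⟩ := List.getLast?_eq_some_iff.mp h1
      cases y with
      | nil => simp at h2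
      | cons yh yt =>
        simp only [List.head?_cons, Option.some.injEq] at h2
        exact ⟨x', yt, by rw [hx', h2]; simp⟩

def HasC (l : List Char) : Prop := ['/', '/'] <:+: l ∨ ['/', '*'] <:+: l

theorem not_pair_infix_singleton (a b c : Char) : ¬ [a, b] <:+: [c] := by
  intro h
  have := h.length_le
  simp at this

theorem hasC_append_safe (x y : List Char)
    (h1 : y.head? ≠ some '/') (h2 : y.head? ≠ some '*') :
    HasC (x ++ y) ↔ HasC x ∨ HasC y := by
  unfold HasC
  rw [infix_pair_append, infix_pair_append]
  tauto

theorem hasC_cons_safe (c : Char) (hc : c ≠ '/') (x : List Char) :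
    HasC (c :: x) ↔ HasC x := by
  have h : c :: x = [c] ++ x := rfl
  rw [h]
  unfold HasC
  rw [infix_pair_append, infix_pair_append]
  simp [not_pair_infix_singleton, hc]

theorem hasC_singleton (c : Char) : ¬ HasC [c] := by
  unfold HasC
  simp [not_pair_infix_singleton]

theorem hasC_wrap (x : List Char) : HasC ('\n' :: (x ++ ['\n'])) ↔ HasC x := by
  rw [hasC_cons_safe _ (by decide), hasC_append_safe _ _ (by simp) (by simp)]
  exact or_iff_left (hasC_singleton '\n')

theorem strHasC_iff_counts (s : String) :
    HasC s.toList ↔ (PySem.Chars.count s.toList ['/', '/'] ≠ 0 ∨ PySem.Chars.count s.toList ['/', '*'] ≠ 0) := by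
  rw [count_pos_iff _ _ (by simp), count_pos_iff _ _ (by simp)]
  rfl

theorem strHasC_iff_isIn (s : String) :
    (PySem.Chars.isIn ['/', '/'] s.toList || PySem.Chars.isIn ['/', '*'] s.toList) = true
      ↔ HasC s.toList := by
  rw [Bool.or_eq_true, PySem.Chars.isIn_iff_infix, PySem.Chars.isIn_iff_infix]
  rfl

theorem startswith_dot_head (x : String) (h : PySem.Str.startswith x "." = true) :
    x.toList.head? = some '.' := by
  rw [PySem.Str.startswith_eq] at h
  have h' := (PySem.Chars.startswith_iff _ _).mp h
  have hd : ("." : String).toList = ['.'] := by decide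
  rw [hd] at h'
  obtain ⟨t, ht⟩ := h'
  rw [← ht]
  simp

theorem hasC_render1 (x : String) : HasC ("\n" ++ x ++ "\n").toList ↔ HasC x.toList := by
  have h : ("\n" ++ x ++ "\n").toList = '\n' :: (x.toList ++ ['\n']) := by
    simp [String.toList_append]
  rw [h, hasC_wrap]

theorem hasC_merge_space (cur x : String) (h : ¬ HasC cur.toList) :
    HasC (cur ++ " " ++ x).toList ↔ HasC x.toList := by
  have hl : (cur ++ " " ++ x).toList = cur.toList ++ (' ' :: x.toList) := by
    simp [String.toList_append]
  rw [hl, hasC_append_safe _ _ (by simp) (by simp), hasC_cons_safe _ (by decide)]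
  exact or_iff_right h

theorem hasC_merge_dot (cur x : String) (h : ¬ HasC cur.toList)
    (hx : x.toList.head? = some '.') :
    HasC (cur ++ x).toList ↔ HasC x.toList := by
  have hl : (cur ++ x).toList = cur.toList ++ x.toList := by simp [String.toList_append]
  rw [hl, hasC_append_safe _ _ (by simp [hx]) (by simp [hx])]
  exact or_iff_right h

theorem getLast!_concat_str (l : List String) (c : String) : (l ++ [c]).getLast! = c := by
  rw [List.getLast!_eq_getLast?_getD]
  simp

theorem cond_defs_eq : check_condition_define = is_cond_alt := rfl

theorem stepA_concat (done : List String) (cur x : String) :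
    stepA (done ++ [cur]) x =
      if (PySem.Str.count cur "//" != 0) || (PySem.Str.count cur "/*" != 0)
          || check_condition_define x then
        done ++ [cur] ++ [if check_condition_define x then "\n" ++ x ++ "\n" else x]
      else if PySem.Str.startswith x "." then done ++ [cur ++ x]
      else done ++ [cur ++ " " ++ x] := by
  simp only [stepA, getLast!_concat_str, List.dropLast_concat]
  have hne : (done ++ [cur]).isEmpty = false := by simp
  rw [hne]
  simp only [Bool.false_or, List.append_assoc]

theorem mainA (rest : List String) : ∀ (done : List String) (cur prev : String),
    (HasC cur.toList ↔ HasC prev.toList) →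
    rest.foldl stepA (done ++ [cur]) =
      done ++ renderCont cur (takeGroup prev rest).1 ::
        (groupsOf (takeGroup prev rest).2).map renderGroup := by
  induction rest with
  | nil =>
    intro done cur prev _
    simp [takeGroup, groupsOf, renderCont]
  | cons x rs ih =>
    intro done cur prev hinv
    rw [List.foldl_cons, stepA_concat]
    by_cases hP : HasC prev.toList ∨ is_cond_alt x = true
    · -- A starts a new group; B closes the current group
      have hcond : ((PySem.Str.count cur "//" != 0) || (PySem.Str.count cur "/*" != 0)
          || check_condition_define x) = true := by
        rcases hP with hP | hP
        · have h := (strHasC_iff_counts cur).mp (hinv.mpr hP)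
          simp only [Bool.or_eq_true, bne_iff_ne, ne_eq, PySem.Str.count_eq]
          have h1 : ("//" : String).toList = ['/', '/'] := by decide
          have h2 : ("/*" : String).toList = ['/', '*'] := by decide
          rw [h1, h2]
          tauto
        · rw [cond_defs_eq]; simp [hP]
      have htg : takeGroup prev (x :: rs) = ([], x :: rs) := by
        rw [takeGroup, if_pos]
        rcases hP with hP | hP
        · have h := (strHasC_iff_isIn prev).mpr hP
          simp only [Bool.or_eq_true] at h ⊢
          simp only [PySem.Str.isIn_eq]
          have h1 : ("//" : String).toList = ['/', '/'] := by decide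
          have h2 : ("/*" : String).toList = ['/', '*'] := by decide
          rw [h1, h2]
          tauto
        · simp [hP]
      rw [if_pos hcond, htg]
      have hinv' : HasC (if check_condition_define x then "\n" ++ x ++ "\n" else x).toList
          ↔ HasC x.toList := by
        split
        · exact hasC_render1 x
        · exact Iff.rfl
      rw [ih (done ++ [cur]) _ x hinv']
      rw [groupsOf]
      simp only [List.map_cons, renderGroup, ← cond_defs_eq]
      simp only [renderCont, List.foldl_nil, List.append_assoc, List.singleton_append]
      rfl
    · -- A merges the line into the last element; B extends the current group
      rw [not_or] at hP
      obtain ⟨hPrev, hCnd⟩ := hP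
      have hcur : ¬ HasC cur.toList := fun hc => hPrev (hinv.mp hc)
      have hcond : ((PySem.Str.count cur "//" != 0) || (PySem.Str.count cur "/*" != 0)
          || check_condition_define x) = false := by
        have h := (strHasC_iff_counts cur).not.mp hcur
        rw [not_or, not_ne_iff, not_ne_iff] at h
        rw [cond_defs_eq]
        have h1 : ("//" : String).toList = ['/', '/'] := by decide
        have h2 : ("/*" : String).toList = ['/', '*'] := by decide
        simp only [PySem.Str.count_eq, h1, h2]
        simp [h.1, h.2, hCnd]
      have htg : takeGroup prev (x :: rs) = (x :: (takeGroup x rs).1, (takeGroup x rs).2) := by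
        rw [takeGroup, if_neg]
        have h := (strHasC_iff_isIn prev).not.mpr hPrev
        simp only [Bool.or_eq_true, not_or, Bool.not_eq_true] at h
        have h1 : ("//" : String).toList = ['/', '/'] := by decide
        have h2 : ("/*" : String).toList = ['/', '*'] := by decide
        simp only [Bool.or_eq_true, not_or, PySem.Str.isIn_eq, h1, h2]
        simp [h.1, h.2, hCnd]
      rw [hcond, htg]
      simp only [Bool.false_eq_true, if_false]
      by_cases hdot : PySem.Str.startswith x "." = true
      · rw [if_pos hdot]
        have hinv'' : HasC (cur ++ x).toList ↔ HasC x.toList :=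
          hasC_merge_dot cur x hcur (startswith_dot_head x hdot)
        rw [ih done (cur ++ x) x hinv'']
        have hdot' : PySem.Chars.startswith x.toList ['.'] = true := by
          have hd : ("." : String).toList = ['.'] := by decide
          rw [← hd, ← PySem.Str.startswith_eq]; exact hdot
        have hrc : renderCont cur (x :: (takeGroup x rs).1)
            = renderCont (cur ++ x) (takeGroup x rs).1 := by
          simp [renderCont, hdot']
        rw [hrc]
      · rw [if_neg hdot]
        have hinv'' : HasC (cur ++ " " ++ x).toList ↔ HasC x.toList :=
          hasC_merge_space cur x hcur
        rw [ih done (cur ++ " " ++ x) x hinv'']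
        have hdot' : ¬ PySem.Chars.startswith x.toList ['.'] = true := by
          have hd : ("." : String).toList = ['.'] := by decide
          rw [← hd, ← PySem.Str.startswith_eq]; exact hdot
        have hrc : renderCont cur (x :: (takeGroup x rs).1)
            = renderCont (cur ++ " " ++ x) (takeGroup x rs).1 := by
          simp [renderCont, hdot']
        rw [hrc]

theorem equiv_all (content : List String) :
    short_head_content content = short_head_content_alt content := by
  cases content with
  | nil => simp [short_head_content, short_head_content_alt, groupsOf]
  | cons h rest =>
    unfold short_head_content short_head_content_alt
    rw [List.foldl_cons]
    have h0 : stepA [] h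
        = [] ++ [if check_condition_define h then "\n" ++ h ++ "\n" else h] := by
      simp [stepA]
    have hinv0 : HasC (if check_condition_define h then "\n" ++ h ++ "\n" else h).toList
        ↔ HasC h.toList := by
      split
      · exact hasC_render1 h
      · exact Iff.rfl
    rw [h0, mainA rest [] _ h hinv0, groupsOf]
    simp only [List.map_cons, renderGroup, ← cond_defs_eq]
    simp only [List.nil_append]
    rfl

-- ===== VERDICT (by name: the statement is the Claim_ definition above) =====
theorem short_head_content_spec : Claim_equal_short_head_content := by
  intro content _
  exact equiv_all content
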